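-- pv_equiv track=rewrite | github.com/jespb/AoC-2024 | day13/main.py | getFirstSecond
-- ===== SOURCE A (Python) =====
-- def getFirstSecond(ab, bb, t):
--
--     firstdiv = -1
--     seconddiv = -1
--
--     tmp = t[0] % bb[0]
--     tmp2 = (t[0]-ab[0]) % bb[0]
--     dt = tmp2-tmp # 0-1  4-2
--     cycle = False
--     fail = False
--     x = 1
--     while not cycle:
--         v = (t[0] - x * ab[0]) % bb[0]
--         x += 1
--         if v == 0:
--             firstdiv = x-1
--             cycle = True
--         if v == tmp:
--             cycle = True
--             #fail = True
--
--     if firstdiv != -1 and not fail: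
--         cycle = False
--         tmp = 0
--         while not cycle:
--             v = (t[0] - x * ab[0]) % bb[0]
--             x += 1
--             if v == 0:
--                 seconddiv = x-1
--                 cycle = True
--             elif v == tmp:
--                 cycle = True
--                 #fail = True
--
--     return firstdiv,seconddiv,fail
-- ===== SOURCE B (Python) =====
-- def _egcd(a, b):
--     # iterative extended Euclid: returns (g, s) with g = gcd(a, b) >= 0 and a*s == g (mod b)
--     old_r, r = a, b
--     old_s, s = 1, 0
--     while r != 0:
--         q = old_r // r
--         old_r, r = r, old_r - q * r
--         old_s, s = s, old_s - q * s
--     if old_r < 0: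
--         old_r, old_s = -old_r, -old_s
--     return old_r, old_s
--
-- def getFirstSecond(ab, bb, t):
--     a, b, t0 = ab[0], bb[0], t[0]
--     m = b if b > 0 else -b
--     g, inv = _egcd(a, m)
--     if t0 % g != 0:
--         return -1, -1, False
--     p = m // g
--     x0 = (inv * (t0 // g) - 1) % p + 1
--     return x0, x0 + p, False
-- ===== Notes on version B (the rewrite author's own statement) =====
-- stated objective: faster
-- what changed: A finds the two smallest x>=1 with x*ab[0] == t[0] (mod bb[0]) by scanning residues one by one in two while loops; B solves the linear congruence directly with an iterative extended Euclid (gcd + Bezout coefficient) and returns x0 and x0 + bb[0]/gcd in closed form.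
import Mathlib
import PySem

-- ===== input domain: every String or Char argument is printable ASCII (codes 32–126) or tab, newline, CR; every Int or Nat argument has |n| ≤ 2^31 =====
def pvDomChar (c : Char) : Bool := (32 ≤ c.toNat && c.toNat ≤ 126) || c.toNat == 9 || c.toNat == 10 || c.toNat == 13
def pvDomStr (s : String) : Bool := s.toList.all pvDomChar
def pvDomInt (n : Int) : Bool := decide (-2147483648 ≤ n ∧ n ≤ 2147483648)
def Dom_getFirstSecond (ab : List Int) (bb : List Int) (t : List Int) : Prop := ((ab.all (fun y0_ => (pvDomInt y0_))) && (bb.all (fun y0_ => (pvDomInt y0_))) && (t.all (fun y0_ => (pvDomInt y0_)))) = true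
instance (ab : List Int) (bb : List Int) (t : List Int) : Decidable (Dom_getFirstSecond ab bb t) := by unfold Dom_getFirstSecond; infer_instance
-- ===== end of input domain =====

-- B replaces A's linear scan for the two smallest x ≥ 1 with x*ab[0] ≡ t[0] (mod bb[0]) by
-- extended Euclid / a modular inverse (objective: faster; A scans up to |bb[0]| residues, B does
-- O(log |bb[0]|) arithmetic steps).
-- ===== PORT A =====
-- first while loop of A: state is (firstdiv-so-far, x); the fuel argument only makes the
-- recursion structural — the proof shows the loop always stops before the fuel runs out
def pvLoop1 (t0 a b tmp : Int) : Nat → Int → Int × Int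
  | 0, x => (-1, x)
  | f+1, x =>
    let v := PySem.Int.mod (t0 - x * a) b
    if v = 0 then (x, x + 1)
    else if v = tmp then (-1, x + 1)
    else pvLoop1 t0 a b tmp f (x + 1)
-- second while loop of A (its local tmp is 0, so the elif compares v with 0; fuel as above)
def pvLoop2 (t0 a b : Int) : Nat → Int → Int
  | 0, _ => -1
  | f+1, x =>
    let v := PySem.Int.mod (t0 - x * a) b
    if v = 0 then x
    else if v = (0:Int) then -1
    else pvLoop2 t0 a b f (x + 1)
def getFirstSecond (ab : List Int) (bb : List Int) (t : List Int) : Int × Int × Bool :=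
  let a := (PySem.List.pyGet? ab 0).getD 0
  let b := (PySem.List.pyGet? bb 0).getD 0
  let t0 := (PySem.List.pyGet? t 0).getD 0
  let tmp := PySem.Int.mod t0 b
  let fuel := b.natAbs + 1
  let r1 := pvLoop1 t0 a b tmp fuel 1
  if r1.1 ≠ -1 then (r1.1, pvLoop2 t0 a b fuel r1.2, false)
  else (r1.1, -1, false)
-- ===== PORT B =====
-- termination measure for the Euclid loop of Source B (the Python remainder shrinks in absolute value)
theorem pvRem_natAbs_lt (a r : Int) (h : r ≠ 0) :
    (a - PySem.Int.floordiv a r * r).natAbs < r.natAbs := by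
  have hm := PySem.Int.floordiv_mul_add_mod a r
  rcases lt_or_gt_of_ne h with hneg | hpos
  · have hb := PySem.Int.mod_neg_bounds a hneg
    omega
  · have h1 := PySem.Int.mod_nonneg a hpos
    have h2 := PySem.Int.mod_lt a hpos
    omega
-- the 'while r != 0' loop of _egcd in Source B, state (old_r, r, old_s, s)
def pvEgcdGo (oldr r olds s : Int) : Int × Int :=
  if h : r = 0 then
    if oldr < 0 then (-oldr, -olds) else (oldr, olds)
  else
    let q := PySem.Int.floordiv oldr r
    pvEgcdGo r (oldr - q * r) s (olds - q * s)
termination_by r.natAbs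
decreasing_by exact pvRem_natAbs_lt oldr r h
def pvEgcd (a b : Int) : Int × Int := pvEgcdGo a b 1 0
def getFirstSecond_alt (ab : List Int) (bb : List Int) (t : List Int) : Int × Int × Bool :=
  let a := (PySem.List.pyGet? ab 0).getD 0
  let b := (PySem.List.pyGet? bb 0).getD 0
  let t0 := (PySem.List.pyGet? t 0).getD 0
  let m := if b > 0 then b else -b
  let gi := pvEgcd a m
  if PySem.Int.mod t0 gi.1 ≠ 0 then (-1, -1, false)
  else
    let p := PySem.Int.floordiv m gi.1
    let x0 := PySem.Int.mod (gi.2 * PySem.Int.floordiv t0 gi.1 - 1) p + 1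
    (x0, x0 + p, false)
-- ===== PRECONDITION & SPEC =====
-- Pre_ excludes exactly the inputs where the Python A raises: an empty ab/bb/t (IndexError)
-- and bb[0] = 0 (ZeroDivisionError in '%').
def Pre_getFirstSecond (ab : List Int) (bb : List Int) (t : List Int) : Prop :=
  ab ≠ [] ∧ bb ≠ [] ∧ t ≠ [] ∧ bb.headD 0 ≠ 0
instance (ab : List Int) (bb : List Int) (t : List Int) : Decidable (Pre_getFirstSecond ab bb t) := by
  unfold Pre_getFirstSecond; infer_instance

def pvWitness_getFirstSecond : List Int × List Int × List Int := ([3], [7], [5])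

def Spec_getFirstSecond (ab : List Int) (bb : List Int) (t : List Int) (out : Int × Int × Bool) : Prop := out = getFirstSecond_alt ab bb t
instance (ab : List Int) (bb : List Int) (t : List Int) (out : Int × Int × Bool) : Decidable (Spec_getFirstSecond ab bb t out) := by unfold Spec_getFirstSecond; infer_instance

-- ===== CLAIM (what is proved, stated in full; the proofs are below) =====
def Claim_equal_getFirstSecond : Prop := ∀ (ab : List Int) (bb : List Int) (t : List Int), Dom_getFirstSecond ab bb t → Pre_getFirstSecond ab bb t → Spec_getFirstSecond ab bb t (getFirstSecond ab bb t)

-- ===== LEMMAS AND PROOFS =====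

-- Euclid loop correctness: the result is (gcd, a Bézout coefficient mod m)
theorem pvEgcdGo_spec (a m : Int) : ∀ (oldr r olds s : Int),
    m ∣ (a * olds - oldr) → m ∣ (a * s - r) →
    (pvEgcdGo oldr r olds s).1 = (Int.gcd oldr r : Int) ∧
      m ∣ (a * (pvEgcdGo oldr r olds s).2 - (pvEgcdGo oldr r olds s).1) := by
  intro oldr r olds s
  induction oldr, r, olds, s using pvEgcdGo.induct with
  | case1 oldr olds s hneg =>
    intro h1 h2
    rw [pvEgcdGo]; simp only [if_pos hneg, reduceDIte]
    refine ⟨by rw [Int.gcd_zero_right]; omega, ?_⟩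
    have he : a * (-olds) - (-oldr) = -(a * olds - oldr) := by ring
    simp only [he]
    exact dvd_neg.mpr h1
  | case2 oldr olds s hpos =>
    intro h1 h2
    rw [pvEgcdGo]; simp only [if_neg hpos, reduceDIte]
    exact ⟨by rw [Int.gcd_zero_right]; omega, h1⟩
  | case3 oldr r olds s hr q ih =>
    intro h1 h2
    rw [pvEgcdGo]; simp only [dif_neg hr]
    have hg : Int.gcd r (oldr - PySem.Int.floordiv oldr r * r) = Int.gcd oldr r := by
      rw [Int.gcd_comm]
      exact Int.gcd_sub_mul_right_left r oldr (PySem.Int.floordiv oldr r)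
    have h2' : m ∣ (a * (olds - PySem.Int.floordiv oldr r * s) -
        (oldr - PySem.Int.floordiv oldr r * r)) := by
      have he : a * (olds - PySem.Int.floordiv oldr r * s) -
          (oldr - PySem.Int.floordiv oldr r * r)
          = (a * olds - oldr) - PySem.Int.floordiv oldr r * (a * s - r) := by ring
      rw [he]
      exact dvd_sub h1 (Dvd.dvd.mul_left h2 _)
    obtain ⟨hA, hB⟩ := ih h2 h2'
    exact ⟨by rw [hA, hg], hB⟩
-- the key divisibility: with 0 < m, g = gcd(a,m), p = m/g we have m ∣ x*a ↔ p ∣ x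
theorem pvKeyDvd (a m x : Int) (hm : 0 < m) :
    m ∣ x * a ↔ (m / (Int.gcd a m : Int)) ∣ x := by
  set G : Int := (Int.gcd a m : Int) with hG
  have hGpos : 0 < G := by
    have h0 : 0 < Int.gcd a m := Int.gcd_pos_iff.mpr (Or.inr (by omega))
    omega
  have hGa : G ∣ a := Int.gcd_dvd_left a m
  have hGm : G ∣ m := Int.gcd_dvd_right a m
  obtain ⟨a', ha'⟩ := hGa
  obtain ⟨p, hp⟩ := hGm
  have hpdiv : m / G = p := by rw [hp]; exact Int.mul_ediv_cancel_left p (by omega)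
  have hcop : Int.gcd p a' = 1 := by
    have h0 : 0 < Int.gcd a m := by omega
    have hd := Int.gcd_div_gcd_div_gcd h0
    have ha'' : a / G = a' := by rw [ha']; exact Int.mul_ediv_cancel_left a' (by omega)
    rw [Int.gcd_comm, ← ha'', ← hpdiv]
    exact hd
  rw [hpdiv]
  constructor
  · rintro ⟨k, hk⟩
    have hxk : p ∣ x * a' := by
      refine ⟨k, ?_⟩
      have h3 : G * (x * a') = G * (p * k) := by
        calc G * (x * a') = x * a := by rw [ha']; ring
        _ = m * k := hk
        _ = G * (p * k) := by rw [hp]; ring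
      exact mul_left_cancel₀ (by omega : G ≠ 0) h3
    exact Int.dvd_of_dvd_mul_left_of_gcd_one hxk hcop
  · rintro ⟨k, hk⟩
    exact ⟨k * a', by rw [hp, ha', hk]; ring⟩
-- Python mod is a canonical representative: equal mods ↔ divisible difference (b ≠ 0)
theorem pvModEqIff (y z b : Int) (hb : b ≠ 0) :
    PySem.Int.mod y b = PySem.Int.mod z b ↔ b ∣ (y - z) := by
  have hy := PySem.Int.floordiv_mul_add_mod y b
  have hz := PySem.Int.floordiv_mul_add_mod z b
  constructor
  · intro h
    refine ⟨PySem.Int.floordiv y b - PySem.Int.floordiv z b, ?_⟩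
    have he : y - z = (PySem.Int.floordiv y b * b + PySem.Int.mod y b)
        - (PySem.Int.floordiv z b * b + PySem.Int.mod z b) := by rw [hy, hz]
    rw [he, h]; ring
  · intro h
    have hd : b ∣ (PySem.Int.mod y b - PySem.Int.mod z b) := by
      have he : PySem.Int.mod y b - PySem.Int.mod z b
          = (y - z) - (PySem.Int.floordiv y b - PySem.Int.floordiv z b) * b := by
        linear_combination hy - hz
      rw [he]
      exact dvd_sub h (dvd_mul_left b _)
    have hbnd : (PySem.Int.mod y b - PySem.Int.mod z b).natAbs < b.natAbs := by
      rcases lt_or_gt_of_ne hb with hneg | hpos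
      · have b1 := PySem.Int.mod_neg_bounds y hneg
        have b2 := PySem.Int.mod_neg_bounds z hneg
        omega
      · have b1 := PySem.Int.mod_nonneg y hpos
        have b2 := PySem.Int.mod_lt y hpos
        have b3 := PySem.Int.mod_nonneg z hpos
        have b4 := PySem.Int.mod_lt z hpos
        omega
    have := Int.eq_zero_of_dvd_of_natAbs_lt_natAbs hd hbnd
    omega
-- the loops skip over iterations on which neither stopping condition fires
theorem pvLoop1_skip (t0 a b tmp : Int) : ∀ (n f : Nat) (x : Int),
    (∀ j : Nat, j < n → PySem.Int.mod (t0 - (x + j) * a) b ≠ 0 ∧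
       PySem.Int.mod (t0 - (x + j) * a) b ≠ tmp) →
    pvLoop1 t0 a b tmp (n + f) x = pvLoop1 t0 a b tmp f (x + n) := by
  intro n
  induction n with
  | zero => intro f x _; simp
  | succ k ih =>
    intro f x h
    have h0 := h 0 (by omega)
    simp only [Int.natCast_zero, add_zero] at h0
    have hnf : (k + 1) + f = (k + f) + 1 := by omega
    rw [hnf, pvLoop1]
    simp only [if_neg h0.1, if_neg h0.2]
    rw [ih f (x + 1) (fun j hj => by
      have hh := h (j + 1) (by omega)
      push_cast at hh ⊢
      convert hh using 3 <;> ring)]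
    congr 1
    push_cast; ring
theorem pvLoop2_skip (t0 a b : Int) : ∀ (n f : Nat) (x : Int),
    (∀ j : Nat, j < n → PySem.Int.mod (t0 - (x + j) * a) b ≠ 0) →
    pvLoop2 t0 a b (n + f) x = pvLoop2 t0 a b f (x + n) := by
  intro n
  induction n with
  | zero => intro f x _; simp
  | succ k ih =>
    intro f x h
    have h0 := h 0 (by omega)
    simp only [Int.natCast_zero, add_zero] at h0
    have hnf : (k + 1) + f = (k + f) + 1 := by omega
    rw [hnf, pvLoop2]
    simp only [if_neg h0]
    rw [ih f (x + 1) (fun j hj => by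
      have hh := h (j + 1) (by omega)
      push_cast at hh ⊢
      convert hh using 3 <;> ring)]
    congr 1
    push_cast; ring
-- the scalar core: on lists with heads a / b / t0 and b ≠ 0 the two ports agree
theorem pvCore (a b t0 : Int) (ab' bb' t' : List Int) (hb : b ≠ 0) :
    getFirstSecond (a::ab') (b::bb') (t0::t') = getFirstSecond_alt (a::ab') (b::bb') (t0::t') := by
  have hget : ∀ (x : Int) (l : List Int), (PySem.List.pyGet? (x::l) 0).getD 0 = x := by
    intro x l; simp [pysem]
  simp only [getFirstSecond, getFirstSecond_alt, hget]
  set m : Int := if b > 0 then b else -b with hm_def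
  have hm : 0 < m := by rw [hm_def]; split_ifs with h <;> omega
  have hmb : ∀ y : Int, (b ∣ y ↔ m ∣ y) := by
    intro y; rw [hm_def]; split_ifs with h
    · exact Iff.rfl
    · exact (neg_dvd).symm
  have hmabs : m.toNat = b.natAbs := by rw [hm_def]; split_ifs with h <;> omega
  -- egcd facts
  have hspec := pvEgcdGo_spec a m a m 1 0 (by simp) (by simp)
  rw [show pvEgcdGo a m 1 0 = pvEgcd a m from rfl] at hspec
  rcases hEg : pvEgcd a m with ⟨G, inv⟩
  rw [hEg] at hspec
  obtain ⟨hg1, hBez⟩ := hspec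
  dsimp only at hg1 hBez
  have hGpos : 0 < G := by
    have h0 : 0 < Int.gcd a m := Int.gcd_pos_iff.mpr (Or.inr (by omega))
    omega
  have hGa : G ∣ a := by rw [hg1]; exact Int.gcd_dvd_left a m
  have hGm : G ∣ m := by rw [hg1]; exact Int.gcd_dvd_right a m
  have hkey : ∀ x : Int, m ∣ x * a ↔ (m / G) ∣ x := by
    intro x; rw [hg1]; exact pvKeyDvd a m x hm
  have hGp : G * (m / G) = m := Int.mul_ediv_cancel' hGm
  have hppos : 0 < m / G := by nlinarith
  have hpm : m / G ≤ m := by nlinarith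
  have hfd : PySem.Int.floordiv m G = m / G := PySem.Int.floordiv_eq_ediv_of_pos hGpos
  -- condition translations
  have hv0 : ∀ x : Int, (PySem.Int.mod (t0 - x * a) b = 0 ↔ m ∣ (t0 - x * a)) := by
    intro x; rw [PySem.Int.mod_eq_zero_iff_dvd]; exact hmb _
  have hvt : ∀ x : Int, (PySem.Int.mod (t0 - x * a) b = PySem.Int.mod t0 b ↔ (m / G) ∣ x) := by
    intro x
    rw [pvModEqIff _ _ _ hb]
    have he : t0 - x * a - t0 = -(x * a) := by ring
    rw [he, dvd_neg, hmb, hkey]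
  dsimp only
  rw [hfd]
  have hfdt : PySem.Int.floordiv t0 G = t0 / G := PySem.Int.floordiv_eq_ediv_of_pos hGpos
  rw [hfdt]
  have hndvd : ∀ x : Int, 0 < x → x < m / G → ¬ ((m / G) ∣ x) := by
    intro x h1 h2 hd
    have := Int.eq_zero_of_dvd_of_natAbs_lt_natAbs hd (by omega)
    omega
  by_cases hdvd : G ∣ t0
  · -- solvable case
    conv_rhs => rw [if_neg (by simp [PySem.Int.mod_eq_zero_iff_dvd, hdvd])]
    set q : Int := t0 / G with hq_def
    have ht0 : G * q = t0 := Int.mul_ediv_cancel' hdvd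
    have hmodp : PySem.Int.mod (inv * (t0 / G) - 1) (m / G)
        = (inv * (t0 / G) - 1) % (m / G) := PySem.Int.mod_eq_emod_of_pos hppos
    set c : Int := inv * q with hc_def
    set x0 : Int := PySem.Int.mod (c - 1) (m / G) + 1 with hx0_def
    have he1 : 0 ≤ (c - 1) % (m / G) := Int.emod_nonneg _ (by omega)
    have he2 : (c - 1) % (m / G) < m / G := Int.emod_lt_of_pos _ hppos
    have hx0b : 1 ≤ x0 ∧ x0 ≤ m / G := by rw [hx0_def, hmodp]; omega
    have hx0c : (m / G) ∣ c - x0 := by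
      refine ⟨(c - 1) / (m / G), ?_⟩
      have hde := Int.ediv_add_emod (c - 1) (m / G)
      rw [hx0_def, hmodp]
      omega
    have hhit0 : m ∣ t0 - x0 * a := by
      have h1 : m ∣ t0 - c * a := by
        have he : t0 - c * a = -((a * inv - G) * (t0 / G)) := by
          rw [hc_def]; linear_combination -ht0
        rw [he]
        exact dvd_neg.mpr (hBez.mul_right _)
      have h2 : m ∣ (c - x0) * a := (hkey _).mpr hx0c
      have he : t0 - x0 * a = (t0 - c * a) + (c - x0) * a := by ring
      rw [he]
      exact dvd_add h1 h2
    have huniq : ∀ x : Int, m ∣ t0 - x * a → (m / G) ∣ (x - x0) := by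
      intro x hx
      refine (hkey _).mp ?_
      have he : (x - x0) * a = (t0 - x0 * a) - (t0 - x * a) := by ring
      rw [he]
      exact dvd_sub hhit0 hx
    -- first loop
    obtain ⟨f, hf⟩ : ∃ f, b.natAbs + 1 = (x0 - 1).toNat + (f + 1) :=
      ⟨b.natAbs - (x0 - 1).toNat, by omega⟩
    have hskip : ∀ j : Nat, j < (x0 - 1).toNat →
        PySem.Int.mod (t0 - ((1:Int) + j) * a) b ≠ 0 ∧
        PySem.Int.mod (t0 - ((1:Int) + j) * a) b ≠ PySem.Int.mod t0 b := by
      intro j hj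
      constructor
      · rw [Ne, hv0]
        intro hx
        have hd := huniq _ hx
        have := Int.eq_zero_of_dvd_of_natAbs_lt_natAbs hd (by omega)
        omega
      · rw [Ne, hvt]
        exact hndvd _ (by omega) (by omega)
    have hL1 : pvLoop1 t0 a b (PySem.Int.mod t0 b) (b.natAbs + 1) 1 = (x0, x0 + 1) := by
      rw [hf, pvLoop1_skip t0 a b _ _ _ 1 hskip,
          show (1 : Int) + ((x0 - 1).toNat : Int) = x0 by omega, pvLoop1]
      simp only [if_pos ((hv0 x0).mpr hhit0)]
    rw [hL1]
    have hx0ne : ((x0, x0 + 1) : Int × Int).1 ≠ -1 := by dsimp only; omega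
    rw [if_pos hx0ne]
    -- second loop
    obtain ⟨f2, hf2⟩ : ∃ f2, b.natAbs + 1 = (m / G - 1).toNat + (f2 + 1) :=
      ⟨b.natAbs - (m / G - 1).toNat, by omega⟩
    have hskip2 : ∀ j : Nat, j < (m / G - 1).toNat →
        PySem.Int.mod (t0 - ((x0 + 1) + j) * a) b ≠ 0 := by
      intro j hj
      rw [Ne, hv0]
      intro hx
      have hd := huniq _ hx
      have := Int.eq_zero_of_dvd_of_natAbs_lt_natAbs hd (by omega)
      omega
    have hhitp : m ∣ t0 - (x0 + m / G) * a := by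
      have h2 : m ∣ (m / G) * a := (hkey _).mpr dvd_rfl
      have he : t0 - (x0 + m / G) * a = (t0 - x0 * a) - (m / G) * a := by ring
      rw [he]
      exact dvd_sub hhit0 h2
    have hL2 : pvLoop2 t0 a b (b.natAbs + 1) (x0 + 1) = x0 + m / G := by
      rw [hf2, pvLoop2_skip t0 a b _ _ _ hskip2,
          show (x0 + 1) + ((m / G - 1).toNat : Int) = x0 + m / G by omega, pvLoop2]
      simp only [if_pos ((hv0 (x0 + m / G)).mpr hhitp)]
    dsimp only
    rw [hL2, hx0_def, hc_def]
  · -- unsolvable case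
    conv_rhs => rw [if_pos (by simp [PySem.Int.mod_eq_zero_iff_dvd, hdvd])]
    have hnohit : ∀ x : Int, ¬ (m ∣ t0 - x * a) := by
      intro x hx
      exact hdvd (by
        have h1 : G ∣ t0 - x * a := dvd_trans hGm hx
        have h2 : G ∣ x * a := Dvd.dvd.mul_left hGa x
        have he : t0 = (t0 - x * a) + x * a := by ring
        rw [he]
        exact dvd_add h1 h2)
    obtain ⟨f, hf⟩ : ∃ f, b.natAbs + 1 = (m / G - 1).toNat + (f + 1) :=
      ⟨b.natAbs - (m / G - 1).toNat, by omega⟩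
    have hskip : ∀ j : Nat, j < (m / G - 1).toNat →
        PySem.Int.mod (t0 - ((1:Int) + j) * a) b ≠ 0 ∧
        PySem.Int.mod (t0 - ((1:Int) + j) * a) b ≠ PySem.Int.mod t0 b := by
      intro j hj
      refine ⟨fun hx => hnohit _ ((hv0 _).mp hx), ?_⟩
      rw [Ne, hvt]
      exact hndvd _ (by omega) (by omega)
    have hL1 : pvLoop1 t0 a b (PySem.Int.mod t0 b) (b.natAbs + 1) 1 = (-1, m / G + 1) := by
      rw [hf, pvLoop1_skip t0 a b _ _ _ 1 hskip,
          show (1 : Int) + ((m / G - 1).toNat : Int) = m / G by omega, pvLoop1]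
      rw [if_neg (fun hx => hnohit _ ((hv0 _).mp hx)),
          if_pos ((hvt (m / G)).mpr dvd_rfl)]
    rw [hL1]
    simp
-- ===== VERDICT (by name: the statement is the Claim_ definition above) =====
theorem getFirstSecond_spec : Claim_equal_getFirstSecond := by
  intro ab bb t _ hpre
  obtain ⟨ha, hbnil, ht, hb0⟩ := hpre
  obtain ⟨a, ab', rfl⟩ := List.exists_cons_of_ne_nil ha
  obtain ⟨b, bb', rfl⟩ := List.exists_cons_of_ne_nil hbnil
  obtain ⟨t0, t', rfl⟩ := List.exists_cons_of_ne_nil ht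
  simp only [List.headD_cons] at hb0
  unfold Spec_getFirstSecond
  exact pvCore a b t0 ab' bb' t' hb0
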